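-- pv_equiv track=rewrite | github.com/KaitiMarie/text-manipulation | magicalness.py | mockText
-- ===== SOURCE A (Python) =====
-- def mockText(changes):
--     upper = False
--     out = ""
--     for char in changes:
--         if upper:
--             out += char.upper()
--         else:
--             out += char.lower()
--         upper = not upper
--     return out
-- ===== SOURCE B (Python) =====
-- def mockText(changes):
--     out = []
--     n = len(changes)
--     i = 0
--     while i + 1 < n:
--         out.append(changes[i].lower())
--         out.append(changes[i + 1].upper())
--         i += 2
--     if i < n:
--         out.append(changes[i].lower())
--     return "".join(out)
-- ===== Notes on version B (the rewrite author's own statement) =====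
-- stated objective: alternative
-- what changed: Replaces the per-character fold with a toggling boolean flag by an index loop that consumes two characters per iteration (lower the even-position one, upper the odd-position one) plus one trailing char, joined at the end instead of repeated string concatenation.
import Mathlib
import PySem

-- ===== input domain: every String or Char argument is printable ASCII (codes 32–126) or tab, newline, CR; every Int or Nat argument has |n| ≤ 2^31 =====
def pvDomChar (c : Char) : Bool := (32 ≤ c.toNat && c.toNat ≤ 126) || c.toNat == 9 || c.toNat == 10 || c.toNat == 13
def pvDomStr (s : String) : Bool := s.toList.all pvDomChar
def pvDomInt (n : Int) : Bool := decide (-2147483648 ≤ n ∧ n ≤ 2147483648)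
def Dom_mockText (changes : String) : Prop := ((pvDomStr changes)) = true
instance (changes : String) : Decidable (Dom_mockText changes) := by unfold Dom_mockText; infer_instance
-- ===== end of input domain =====

-- B replaces A's per-character fold with a toggle flag by an index loop consuming
-- two characters per iteration (alternative decomposition; no speed claim).


-- ===== PORT A =====
-- literal port of A: fold over the characters carrying (upper flag, output so far)
def mockText (changes : String) : String :=
  String.ofList (changes.toList.foldl
    (fun (st : Bool × List Char) c =>
      if st.1 then (!st.1, st.2 ++ [PySem.Chars.upperChar c])
      else (!st.1, st.2 ++ [PySem.Chars.lowerChar c]))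
    (false, [])).2

-- ===== PORT B =====
-- literal port of Source B's while loop: index i advances by 2; out accumulates chars
-- the while loop, with a fuel counter (fuel = n always suffices: i grows by 2 each step)
def mockTextAltLoop (cs : List Char) (n : Nat) : Nat → Nat → List Char → List Char
  | fuel + 1, i, out =>
    if i + 1 < n then
      mockTextAltLoop cs n fuel (i + 2)
        (out ++ [PySem.Chars.lowerChar (PySem.List.pyGetD cs (i : Int) ' '),
                 PySem.Chars.upperChar (PySem.List.pyGetD cs ((i : Int) + 1) ' ')])
    else if i < n then out ++ [PySem.Chars.lowerChar (PySem.List.pyGetD cs (i : Int) ' ')]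
    else out
  | 0, i, out =>
    if i < n then out ++ [PySem.Chars.lowerChar (PySem.List.pyGetD cs (i : Int) ' ')]
    else out

def mockText_alt (changes : String) : String :=
  String.ofList (mockTextAltLoop changes.toList changes.toList.length changes.toList.length 0 [])

-- ===== PRECONDITION & SPEC =====
def Spec_mockText (changes : String) (out : String) : Prop := out = mockText_alt changes
instance (changes : String) (out : String) : Decidable (Spec_mockText changes out) := by unfold Spec_mockText; infer_instance

-- ===== CLAIM (what is proved, stated in full; the proofs are below) =====
def Claim_equal_mockText : Prop := ∀ (changes : String), Dom_mockText changes → Spec_mockText changes (mockText changes)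

-- ===== LEMMAS AND PROOFS =====

-- common intermediate form: alternate two characters at a time
def altSpec : List Char → List Char
  | [] => []
  | [c] => [PySem.Chars.lowerChar c]
  | c :: d :: rest => PySem.Chars.lowerChar c :: PySem.Chars.upperChar d :: altSpec rest

-- A's fold, with the accumulated output factored out
def goA : Bool → List Char → List Char
  | _, [] => []
  | u, c :: cs =>
    (if u then PySem.Chars.upperChar c else PySem.Chars.lowerChar c) :: goA (!u) cs

theorem foldA_eq_goA (cs : List Char) (u : Bool) (out : List Char) :
    (cs.foldl
      (fun (st : Bool × List Char) c =>
        if st.1 then (!st.1, st.2 ++ [PySem.Chars.upperChar c])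
        else (!st.1, st.2 ++ [PySem.Chars.lowerChar c]))
      (u, out)).2 = out ++ goA u cs := by
  induction cs generalizing u out with
  | nil => simp [goA]
  | cons c cs ih =>
    cases u <;> simp [goA, List.foldl, ih]

theorem goA_false_eq_altSpec (cs : List Char) : goA false cs = altSpec cs := by
  induction cs using altSpec.induct with
  | case1 => rfl
  | case2 c => rfl
  | case3 c d rest ih => simp [goA, altSpec, ih]

theorem altLoop_eq_altSpec (cs : List Char) (fuel i : Nat) (out : List Char)
    (h : i ≤ cs.length) (hf : cs.length - i ≤ 2 * fuel + 1) :
    mockTextAltLoop cs cs.length fuel i out = out ++ altSpec (cs.drop i) := by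
  induction fuel generalizing i out with
  | zero =>
    rw [mockTextAltLoop]
    by_cases h2 : i < cs.length
    · have hlen : i + 1 = cs.length := by omega
      have hd : cs.drop i = [cs[i]] := by
        rw [List.drop_eq_getElem_cons h2]
        simp [show i + 1 = cs.length from hlen]
      have g1 : PySem.List.pyGetD cs (i : Int) ' ' = cs[i] := by
        rw [PySem.List.pyGetD_natCast, List.getD_eq_getElem _ _ h2]
      rw [if_pos h2, g1, hd]
      simp [altSpec]
    · have hie : i = cs.length := by omega
      rw [if_neg h2, hie]
      simp [altSpec]
  | succ fuel ihf =>
   rw [mockTextAltLoop]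
   by_cases h1 : i + 1 < cs.length
   · have hi : i < cs.length := by omega
     have hi1 : i + 1 < cs.length := h1
     have hd : cs.drop i = cs[i] :: cs[i+1] :: cs.drop (i + 2) := by
       rw [List.drop_eq_getElem_cons hi, List.drop_eq_getElem_cons hi1]
     have ih := ihf (i + 2) (out ++
         [PySem.Chars.lowerChar (PySem.List.pyGetD cs (i : Int) ' '),
          PySem.Chars.upperChar (PySem.List.pyGetD cs ((i : Int) + 1) ' ')])
       (by omega) (by omega)
     rw [if_pos h1, ih, hd]
     have g1 : PySem.List.pyGetD cs (i : Int) ' ' = cs[i] := by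
       rw [PySem.List.pyGetD_natCast, List.getD_eq_getElem _ _ hi]
     have g2 : PySem.List.pyGetD cs ((i : Int) + 1) ' ' = cs[i+1] := by
       rw [show ((i : Int) + 1) = ((i + 1 : Nat) : Int) from by push_cast; ring,
           PySem.List.pyGetD_natCast, List.getD_eq_getElem _ _ hi1]
     rw [g1, g2]
     simp [altSpec]
   · rw [if_neg h1]
     by_cases h2 : i < cs.length
     · have hlen : i + 1 = cs.length := by omega
       have hd : cs.drop i = [cs[i]] := by
         rw [List.drop_eq_getElem_cons h2]
         simp [show i + 1 = cs.length from hlen]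
       have g1 : PySem.List.pyGetD cs (i : Int) ' ' = cs[i] := by
         rw [PySem.List.pyGetD_natCast, List.getD_eq_getElem _ _ h2]
       rw [if_pos h2, g1, hd]
       simp [altSpec]
     · have hie : i = cs.length := by omega
       rw [if_neg h2, hie]
       simp [altSpec]

-- ===== VERDICT (by name: the statement is the Claim_ definition above) =====
theorem mockText_spec : Claim_equal_mockText := by
  intro changes _
  unfold Spec_mockText mockText mockText_alt
  rw [foldA_eq_goA, goA_false_eq_altSpec,
      altLoop_eq_altSpec changes.toList changes.toList.length 0 [] (by omega) (by omega)]
  simp
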